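-- pv_equiv track=rewrite | github.com/jules-jo/test-daemon | src/jules_daemon/wiki/resumption_reconciler.py | _find_marker_in_stream
-- ===== SOURCE A (Python) =====
-- def _normalize_line(raw: str) -> str:
--     """Strip trailing whitespace for comparison.
--
--     Leading whitespace is preserved because indentation may be meaningful
--     in test output.
--     """
--     return raw.rstrip()
--
-- def _check_partial_match(
--     stream_line: str,
--     marker: str,
-- ) -> bool:
--     """Check if the marker is a substring of the stream line (partial-line match).
--
--     Handles both prefix and suffix matches:
--     - Prefix: marker is the start of the actual line (disconnect cut the end)
--     - Suffix: marker is the end of the actual line (disconnect cut the start)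
--     """
--     normalized_stream = _normalize_line(stream_line)
--     normalized_marker = _normalize_line(marker)
--
--     if not normalized_marker:
--         return False
--
--     return (
--         normalized_marker in normalized_stream
--         and normalized_marker != normalized_stream
--     )
--
-- def _find_marker_in_stream(
--     stream_lines: list[str],
--     marker: str,
--     preferred_position: int,
-- ) -> int | None:
--     """Search the stream for the marker, preferring the position closest
--     to the checkpoint's expected position.
--
--     If the marker appears at the preferred_position, return that immediately.
--     Otherwise, find all occurrences and return the one closest to preferred.
--
--     Args:
--         stream_lines: The stream content as a list of lines.
--         marker: The marker text to search for.
--         preferred_position: The checkpoint's expected line number.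
--
--     Returns:
--         The 0-based line number of the best match, or None if not found.
--     """
--     normalized_marker = _normalize_line(marker)
--     if not normalized_marker:
--         return None
--
--     # Check preferred position first (fast path)
--     if preferred_position < len(stream_lines):
--         if _normalize_line(stream_lines[preferred_position]) == normalized_marker:
--             return preferred_position
--
--     # Check for partial match at preferred position
--     if preferred_position < len(stream_lines):
--         if _check_partial_match(stream_lines[preferred_position], marker):
--             return preferred_position
--
--     # Collect all exact match positions
--     exact_positions: list[int] = []
--     for idx, line in enumerate(stream_lines):
--         if _normalize_line(line) == normalized_marker:
--             exact_positions.append(idx)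
--
--     if exact_positions:
--         # Return the position closest to preferred
--         return min(exact_positions, key=lambda p: abs(p - preferred_position))
--
--     # Collect all partial match positions
--     partial_positions: list[int] = []
--     for idx, line in enumerate(stream_lines):
--         if _check_partial_match(line, marker):
--             partial_positions.append(idx)
--
--     if partial_positions:
--         return min(partial_positions, key=lambda p: abs(p - preferred_position))
--
--     return None
-- ===== SOURCE B (Python) =====
-- def _find_marker_in_stream(stream_lines, marker, preferred_position):
--     """Single-pass re-implementation: one scan maintaining the best exact and
--     best partial candidate (closest to preferred_position, lowest index on
--     ties), instead of two full collecting passes plus two min() calls."""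
--     nm = marker.rstrip()
--     if not nm:
--         return None
--     # Fast path: marker (exactly or partially) at the preferred position.
--     if preferred_position < len(stream_lines):
--         line = stream_lines[preferred_position].rstrip()
--         if line == nm or (nm in line and nm != line):
--             return preferred_position
--     best_exact = None
--     best_partial = None
--     for idx, raw in enumerate(stream_lines):
--         line = raw.rstrip()
--         if line == nm:
--             if best_exact is None or abs(idx - preferred_position) < abs(best_exact - preferred_position):
--                 best_exact = idx
--         elif nm in line:
--             if best_partial is None or abs(idx - preferred_position) < abs(best_partial - preferred_position):
--                 best_partial = idx
--     return best_exact if best_exact is not None else best_partial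
-- ===== Notes on version B (the rewrite author's own statement) =====
-- stated objective: simpler
-- what changed: The two separate collecting passes (exact then partial) followed by two min(..., key=abs) calls are replaced by a single scan that maintains the best exact and best partial candidate index with a strict-less distance update (lowest index wins ties, exact candidate returned before partial), avoiding the intermediate position lists and the extra min passes.
import Mathlib
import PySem

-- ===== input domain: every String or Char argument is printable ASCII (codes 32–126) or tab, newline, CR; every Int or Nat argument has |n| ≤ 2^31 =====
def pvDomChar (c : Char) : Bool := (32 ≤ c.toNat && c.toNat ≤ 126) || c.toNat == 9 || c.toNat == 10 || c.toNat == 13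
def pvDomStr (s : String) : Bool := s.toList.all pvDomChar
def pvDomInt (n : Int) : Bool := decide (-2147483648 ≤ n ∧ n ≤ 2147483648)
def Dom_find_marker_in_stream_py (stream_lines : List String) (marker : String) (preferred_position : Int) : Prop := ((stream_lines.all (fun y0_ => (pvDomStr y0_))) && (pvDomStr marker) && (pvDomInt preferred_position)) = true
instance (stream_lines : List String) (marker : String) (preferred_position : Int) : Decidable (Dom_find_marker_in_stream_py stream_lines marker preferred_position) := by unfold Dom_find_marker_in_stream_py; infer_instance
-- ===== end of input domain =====

-- B replaces A's two collecting passes + two min(key=abs) calls by one scan keeping the best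
-- exact / partial candidate; objective: simpler (same asymptotic cost).


-- ===== PORT A =====
-- _normalize_line(raw) = raw.rstrip()  (strings handled as List Char)
def pyNormalize (raw : String) : List Char := PySem.Chars.rstrip raw.toList

-- _check_partial_match
def pyCheckPartial (stream_line : String) (marker : String) : Bool :=
  let normalized_stream := pyNormalize stream_line
  let normalized_marker := pyNormalize marker
  if normalized_marker = [] then false
  else PySem.Chars.isIn normalized_marker normalized_stream && normalized_marker != normalized_stream

-- the part of A after the two fast-path checks: collect all exact positions, take the
-- closest to preferred (min with key, first wins ties), else the same for partial matches
def findA_tail (stream_lines : List String) (marker : String) (preferred_position : Int) (normalized_marker : List Char) : Option Int :=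
  let exact_positions := (PySem.List.enumerate stream_lines).foldl
      (fun acc e => if pyNormalize e.2 == normalized_marker then acc ++ [e.1] else acc) []
  if exact_positions ≠ [] then
    PySem.List.min? exact_positions (fun p => |p - preferred_position|)
  else
    let partial_positions := (PySem.List.enumerate stream_lines).foldl
        (fun acc e => if pyCheckPartial e.2 marker then acc ++ [e.1] else acc) []
    if partial_positions ≠ [] then
      PySem.List.min? partial_positions (fun p => |p - preferred_position|)
    else none

def find_marker_in_stream_py (stream_lines : List String) (marker : String) (preferred_position : Int) : Option Int :=
  let normalized_marker := pyNormalize marker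
  if normalized_marker = [] then none
  else if preferred_position < (stream_lines.length : Int) then
    match PySem.List.pyGet? stream_lines preferred_position with
    | none => none   -- IndexError (preferred_position < -len); excluded by Pre_
    | some line =>
      if pyNormalize line = normalized_marker then some preferred_position
      else if pyCheckPartial line marker then some preferred_position
      else findA_tail stream_lines marker preferred_position normalized_marker
  else findA_tail stream_lines marker preferred_position normalized_marker

-- ===== PORT B =====
-- candidate update: keep the stored index unless the new one is strictly closer to preferred
def altUpd (best : Option Int) (idx preferred_position : Int) : Option Int :=
  match best with
  | none => some idx
  | some m => if |idx - preferred_position| < |m - preferred_position| then some idx else some m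

-- B's single loop body over one enumerate(stream_lines) entry
def altStep (nm : List Char) (preferred_position : Int) (st : Option Int × Option Int) (e : Int × String) : Option Int × Option Int :=
  let line := PySem.Chars.rstrip e.2.toList
  if line == nm then (altUpd st.1 e.1 preferred_position, st.2)
  else if PySem.Chars.isIn nm line then (st.1, altUpd st.2 e.1 preferred_position)
  else st

-- B's single loop: (best_exact, best_partial)
def altScan (stream_lines : List String) (nm : List Char) (preferred_position : Int) : Option Int × Option Int :=
  (PySem.List.enumerate stream_lines).foldl (altStep nm preferred_position) (none, none)

def find_marker_in_stream_py_alt (stream_lines : List String) (marker : String) (preferred_position : Int) : Option Int :=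
  let nm := PySem.Chars.rstrip marker.toList
  if nm = [] then none
  else
    let fastHit : Bool :=
      if preferred_position < (stream_lines.length : Int) then
        match PySem.List.pyGet? stream_lines preferred_position with
        | none => false   -- IndexError in Python; excluded by Pre_
        | some raw =>
          let line := PySem.Chars.rstrip raw.toList
          line == nm || (PySem.Chars.isIn nm line && nm != line)
      else false
    if fastHit then some preferred_position
    else
      match altScan stream_lines nm preferred_position with
      | (some m, _) => some m
      | (none, bp) => bp

-- ===== PRECONDITION & SPEC =====
-- Both programs index stream_lines[preferred_position] whenever preferred_position < len;
-- Python raises IndexError there iff preferred_position < -len, so exactly those inputs are excluded.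
def Pre_find_marker_in_stream_py (stream_lines : List String) (marker : String) (preferred_position : Int) : Prop :=
  -(stream_lines.length : Int) ≤ preferred_position

instance (stream_lines : List String) (marker : String) (preferred_position : Int) : Decidable (Pre_find_marker_in_stream_py stream_lines marker preferred_position) := by unfold Pre_find_marker_in_stream_py; infer_instance

def pvWitness_find_marker_in_stream_py : List String × String × Int := (["x", "ab "], "ab", 0)

def Spec_find_marker_in_stream_py (stream_lines : List String) (marker : String) (preferred_position : Int) (out : Option Int) : Prop := out = find_marker_in_stream_py_alt stream_lines marker preferred_position
instance (stream_lines : List String) (marker : String) (preferred_position : Int) (out : Option Int) : Decidable (Spec_find_marker_in_stream_py stream_lines marker preferred_position out) := by unfold Spec_find_marker_in_stream_py; infer_instance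

-- ===== CLAIM (what is proved, stated in full; the proofs are below) =====
def Claim_equal_find_marker_in_stream_py : Prop := ∀ (stream_lines : List String) (marker : String) (preferred_position : Int), Dom_find_marker_in_stream_py stream_lines marker preferred_position → Pre_find_marker_in_stream_py stream_lines marker preferred_position → Spec_find_marker_in_stream_py stream_lines marker preferred_position (find_marker_in_stream_py stream_lines marker preferred_position)

-- ===== LEMMAS AND PROOFS =====

-- exact-match / partial-match predicates on an enumerated entry (proof-side abbreviations)
def exactP (nm : List Char) (e : Int × String) : Bool := PySem.Chars.rstrip e.2.toList == nm
def partP (nm : List Char) (e : Int × String) : Bool :=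
  !(PySem.Chars.rstrip e.2.toList == nm) && PySem.Chars.isIn nm (PySem.Chars.rstrip e.2.toList)

-- B's pair-state fold splits into two independent argmin folds over the filtered index lists
theorem altScan_split (nm : List Char) (pp : Int) :
    ∀ (l : List (Int × String)) (a b : Option Int),
      l.foldl (altStep nm pp) (a, b)
      = (((l.filter (exactP nm)).map Prod.fst).foldl (fun acc x => altUpd acc x pp) a,
         ((l.filter (partP nm)).map Prod.fst).foldl (fun acc x => altUpd acc x pp) b) := by
  intro l
  induction l with
  | nil => intro a b; rfl
  | cons e t ih =>
    intro a b
    by_cases he : (PySem.Chars.rstrip e.2.toList == nm) = true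
    · have hstep : altStep nm pp (a, b) e = (altUpd a e.1 pp, b) := by simp [altStep, he]
      rw [List.foldl_cons, hstep, ih,
          List.filter_cons_of_pos (by simpa [exactP] using he),
          List.filter_cons_of_neg (by simp [partP, he])]
      simp
    · by_cases hp : PySem.Chars.isIn nm (PySem.Chars.rstrip e.2.toList) = true
      · have hstep : altStep nm pp (a, b) e = (a, altUpd b e.1 pp) := by simp [altStep, he, hp]
        rw [List.foldl_cons, hstep, ih,
            List.filter_cons_of_neg (by simp [exactP, he]),
            List.filter_cons_of_pos (by simp [partP, he, hp])]
        simp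
      · have hstep : altStep nm pp (a, b) e = (a, b) := by simp [altStep, he, hp]
        rw [List.foldl_cons, hstep, ih,
            List.filter_cons_of_neg (by simp [exactP, he]),
            List.filter_cons_of_neg (by simp [partP, he, hp])]

-- Python's min(xs, key=lambda p: abs(p - pp)) IS the strict-less argmin fold B runs
theorem min?_eq_altUpd_foldl (xs : List Int) (pp : Int) :
    PySem.List.min? xs (fun p => |p - pp|) = xs.foldl (fun acc x => altUpd acc x pp) none := by
  unfold PySem.List.min?
  congr 1
  funext acc x
  cases acc <;> simp [altUpd]

-- after the fast path, A's two collect-then-min passes equal B's scan result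
theorem tail_eq (stream_lines : List String) (marker : String) (pp : Int)
    (nm : List Char) (hnm : nm = pyNormalize marker) (hne : nm ≠ []) :
    findA_tail stream_lines marker pp nm
      = (match altScan stream_lines nm pp with
         | (some m, _) => some m
         | (none, bp) => bp) := by
  have hA_exact : (PySem.List.enumerate stream_lines).foldl
      (fun acc e => if pyNormalize e.2 == nm then acc ++ [e.1] else acc) []
      = ((PySem.List.enumerate stream_lines).filter (exactP nm)).map Prod.fst := by
    have := PySem.List.foldl_append_if (exactP nm) Prod.fst (PySem.List.enumerate stream_lines) []
    simpa [exactP, pyNormalize] using this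
  have hA_partial : (PySem.List.enumerate stream_lines).foldl
      (fun acc e => if pyCheckPartial e.2 marker then acc ++ [e.1] else acc) []
      = ((PySem.List.enumerate stream_lines).filter (partP nm)).map Prod.fst := by
    have h1 := PySem.List.foldl_append_if (fun e => pyCheckPartial e.2 marker) Prod.fst
      (PySem.List.enumerate stream_lines) []
    have h2 : ∀ e ∈ PySem.List.enumerate stream_lines,
        pyCheckPartial e.2 marker = partP nm e := by
      intro e _
      simp only [pyCheckPartial, partP, ← hnm]
      rw [if_neg hne]
      cases hin : PySem.Chars.isIn nm (PySem.Chars.rstrip e.2.toList) <;>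
        cases hb : (PySem.Chars.rstrip e.2.toList == nm) <;> simp_all [pyNormalize, bne, BEq.comm]
    rw [h1, List.filter_congr h2]
    simp
  unfold findA_tail altScan
  rw [altScan_split, hA_exact, hA_partial, ← min?_eq_altUpd_foldl, ← min?_eq_altUpd_foldl]
  generalize ((PySem.List.enumerate stream_lines).filter (exactP nm)).map Prod.fst = E
  generalize ((PySem.List.enumerate stream_lines).filter (partP nm)).map Prod.fst = P
  by_cases he : E = []
  · subst he
    by_cases hp : P = []
    · subst hp; simp [PySem.List.min?]
    · obtain ⟨m, hm⟩ : ∃ m, PySem.List.min? P (fun p => |p - pp|) = some m := by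
        cases h : PySem.List.min? P (fun p => |p - pp|) with
        | none => exact absurd ((PySem.List.min?_eq_none_iff _ _).mp h) hp
        | some m => exact ⟨m, rfl⟩
      simp [hp, PySem.List.min?]
  · obtain ⟨m, hm⟩ : ∃ m, PySem.List.min? E (fun p => |p - pp|) = some m := by
      cases h : PySem.List.min? E (fun p => |p - pp|) with
      | none => exact absurd ((PySem.List.min?_eq_none_iff _ _).mp h) he
      | some m => exact ⟨m, rfl⟩
    simp [he, hm]

-- the fast-path index exists under Pre_
theorem pyGet?_isSome_of_pre {α : Type} (xs : List α) (i : Int)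
    (h1 : -(xs.length : Int) ≤ i) (h2 : i < (xs.length : Int)) :
    ∃ y, PySem.List.pyGet? xs i = some y := by
  rw [← Option.isSome_iff_exists]
  simp only [PySem.List.pyGet?, PySem.List.pyIdx?]
  split <;> simp_all <;> omega

-- ===== VERDICT (by name: the statement is the Claim_ definition above) =====
theorem find_marker_in_stream_py_spec : Claim_equal_find_marker_in_stream_py := by
  intro stream_lines marker preferred_position _hDom hPre
  unfold Spec_find_marker_in_stream_py find_marker_in_stream_py find_marker_in_stream_py_alt
  simp only [pyNormalize]
  by_cases hnm : PySem.Chars.rstrip marker.toList = []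
  · simp [hnm]
  · rw [if_neg hnm, if_neg hnm]
    by_cases hlt : preferred_position < (stream_lines.length : Int)
    · obtain ⟨line, hline⟩ := pyGet?_isSome_of_pre stream_lines preferred_position hPre hlt
      simp only [if_pos hlt, hline]
      by_cases hex : PySem.Chars.rstrip line.toList = PySem.Chars.rstrip marker.toList
      · simp [hex]
      · have hbeq : (PySem.Chars.rstrip line.toList == PySem.Chars.rstrip marker.toList) = false := by
          simp [hex]
        have hbne : (PySem.Chars.rstrip marker.toList != PySem.Chars.rstrip line.toList) = true := by
          simp only [bne_iff_ne, ne_eq]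
          exact fun h => hex h.symm
        have hiso : pyCheckPartial line marker
            = PySem.Chars.isIn (PySem.Chars.rstrip marker.toList) (PySem.Chars.rstrip line.toList) := by
          simp [pyCheckPartial, pyNormalize, if_neg hnm, hbne]
        rw [if_neg hex, hiso]
        cases hin : PySem.Chars.isIn (PySem.Chars.rstrip marker.toList) (PySem.Chars.rstrip line.toList) with
        | true => simp [hbeq, hbne]
        | false =>
          simp only [hbeq, Bool.false_or, Bool.false_and, Bool.false_eq_true, if_false]
          exact tail_eq stream_lines marker preferred_position _ rfl hnm
    · simp only [if_neg hlt, Bool.false_eq_true, if_false]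
      exact tail_eq stream_lines marker preferred_position _ rfl hnm
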